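-- pv_equiv track=rewrite | github.com/Jay-Pel/odoo-module-builder | backend/services/ai_agents.py | analyze_module_complexity
-- ===== SOURCE A (Python) =====
-- def analyze_module_complexity(module_files: dict) -> dict:
--     """
--     Analyze module complexity for pricing
--
--     Args:
--         module_files: Dictionary of module files
--
--     Returns:
--         dict: Complexity analysis
--     """
--     analysis = {
--         'total_files': len(module_files),
--         'python_files': 0,
--         'xml_files': 0,
--         'csv_files': 0,
--         'total_lines': 0,
--         'models_count': 0,
--         'views_count': 0,
--         'complexity_score': 0
--     }
--
--     for file_path, content in module_files.items():
--         if not isinstance(content, str):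
--             continue
--
--         lines = content.count('\n') + 1
--         analysis['total_lines'] += lines
--
--         if file_path.endswith('.py'):
--             analysis['python_files'] += 1
--             # Count model definitions
--             analysis['models_count'] += content.count('class ') * content.count('models.Model')
--         elif file_path.endswith('.xml'):
--             analysis['xml_files'] += 1
--             # Count view definitions
--             analysis['views_count'] += content.count('<record') * content.count('ir.ui.view')
--         elif file_path.endswith('.csv'):
--             analysis['csv_files'] += 1
--
--     # Calculate complexity score (0-100)
--     base_score = min(analysis['total_files'] * 5, 30)
--     code_score = min(analysis['total_lines'] // 50, 40)
--     feature_score = min((analysis['models_count'] + analysis['views_count']) * 5, 30)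
--
--     analysis['complexity_score'] = base_score + code_score + feature_score
--
--     return analysis
-- ===== SOURCE B (Python) =====
-- def analyze_module_complexity(module_files: dict) -> dict:
--     """Compute each complexity field by its own independent pass (different decomposition)."""
--     texts = [(p, c) for p, c in module_files.items() if isinstance(c, str)]
--
--     python_files = sum(1 for p, _ in texts if p.endswith('.py'))
--     xml_files = sum(1 for p, _ in texts if p.endswith('.xml'))
--     csv_files = sum(1 for p, _ in texts if p.endswith('.csv'))
--     total_lines = sum(c.count('\n') + 1 for _, c in texts)
--     models_count = sum(c.count('class ') * c.count('models.Model')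
--                        for p, c in texts if p.endswith('.py'))
--     views_count = sum(c.count('<record') * c.count('ir.ui.view')
--                       for p, c in texts if p.endswith('.xml'))
--
--     complexity_score = (min(len(module_files) * 5, 30)
--                         + min(total_lines // 50, 40)
--                         + min((models_count + views_count) * 5, 30))
--
--     return {
--         'total_files': len(module_files),
--         'python_files': python_files,
--         'xml_files': xml_files,
--         'csv_files': csv_files,
--         'total_lines': total_lines,
--         'models_count': models_count,
--         'views_count': views_count,
--         'complexity_score': complexity_score,
--     }
-- ===== Notes on version B (the rewrite author's own statement) =====
-- stated objective: alternative
-- what changed: A keeps one mutable dict and updates all counters inside a single loop with an if/elif chain; B computes each output field by its own independent pass/comprehension over the (path, content) pairs and assembles the result at the end.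
import Mathlib
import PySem

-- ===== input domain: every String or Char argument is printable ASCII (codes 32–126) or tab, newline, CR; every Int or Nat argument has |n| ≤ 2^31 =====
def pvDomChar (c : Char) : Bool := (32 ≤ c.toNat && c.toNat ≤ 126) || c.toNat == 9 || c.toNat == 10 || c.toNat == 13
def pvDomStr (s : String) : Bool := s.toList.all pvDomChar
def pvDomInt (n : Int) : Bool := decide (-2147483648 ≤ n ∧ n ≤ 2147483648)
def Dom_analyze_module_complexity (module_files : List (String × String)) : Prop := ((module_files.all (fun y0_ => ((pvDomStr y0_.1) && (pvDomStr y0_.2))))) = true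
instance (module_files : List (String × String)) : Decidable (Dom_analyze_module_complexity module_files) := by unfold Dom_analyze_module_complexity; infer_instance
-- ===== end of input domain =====

-- B replaces A's single loop over a mutable dict by one independent pass per output field (alternative decomposition; return-value equivalence).

-- ===== PORT A =====
-- one loop iteration of A: state = (python_files, xml_files, csv_files, total_lines, models_count, views_count)
-- (the `isinstance(content, str)` guard is always true here: values are Strings under the type convention)
def amcStep (s : Int × Int × Int × Int × Int × Int) (pc : String × String) :
    Int × Int × Int × Int × Int × Int :=
  match s with
  | (py, xml, csv, lines, models, views) =>
    let lines := lines + ((PySem.Str.count pc.2 "\n" : Int) + 1)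
    if PySem.Str.endswith pc.1 ".py" then
      (py + 1, xml, csv, lines,
       models + (PySem.Str.count pc.2 "class " : Int) * (PySem.Str.count pc.2 "models.Model" : Int),
       views)
    else if PySem.Str.endswith pc.1 ".xml" then
      (py, xml + 1, csv, lines, models,
       views + (PySem.Str.count pc.2 "<record" : Int) * (PySem.Str.count pc.2 "ir.ui.view" : Int))
    else if PySem.Str.endswith pc.1 ".csv" then
      (py, xml, csv + 1, lines, models, views)
    else
      (py, xml, csv, lines, models, views)

def analyze_module_complexity (module_files : List (String × String)) : List (String × Int) :=
  let s := module_files.foldl amcStep (0, 0, 0, 0, 0, 0)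
  match s with
  | (py, xml, csv, lines, models, views) =>
    let base_score := min ((module_files.length : Int) * 5) 30
    let code_score := min (PySem.Int.floordiv lines 50) 40
    let feature_score := min ((models + views) * 5) 30
    [("total_files", (module_files.length : Int)),
     ("python_files", py), ("xml_files", xml), ("csv_files", csv),
     ("total_lines", lines), ("models_count", models), ("views_count", views),
     ("complexity_score", base_score + code_score + feature_score)]

-- ===== PORT B =====
def analyze_module_complexity_alt (module_files : List (String × String)) : List (String × Int) :=
  let texts := module_files   -- the isinstance(c, str) filter keeps everything: values are Strings
  let python_files : Int := (texts.countP (fun pc => PySem.Str.endswith pc.1 ".py") : Int)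
  let xml_files : Int := (texts.countP (fun pc => PySem.Str.endswith pc.1 ".xml") : Int)
  let csv_files : Int := (texts.countP (fun pc => PySem.Str.endswith pc.1 ".csv") : Int)
  let total_lines : Int := (texts.map (fun pc => (PySem.Str.count pc.2 "\n" : Int) + 1)).sum
  let models_count : Int :=
    ((texts.filter (fun pc => PySem.Str.endswith pc.1 ".py")).map
      (fun pc => (PySem.Str.count pc.2 "class " : Int) * (PySem.Str.count pc.2 "models.Model" : Int))).sum
  let views_count : Int :=
    ((texts.filter (fun pc => PySem.Str.endswith pc.1 ".xml")).map
      (fun pc => (PySem.Str.count pc.2 "<record" : Int) * (PySem.Str.count pc.2 "ir.ui.view" : Int))).sum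
  let complexity_score :=
    min ((module_files.length : Int) * 5) 30
    + min (PySem.Int.floordiv total_lines 50) 40
    + min ((models_count + views_count) * 5) 30
  [("total_files", (module_files.length : Int)),
   ("python_files", python_files), ("xml_files", xml_files), ("csv_files", csv_files),
   ("total_lines", total_lines), ("models_count", models_count), ("views_count", views_count),
   ("complexity_score", complexity_score)]

-- ===== PRECONDITION & SPEC =====
def Spec_analyze_module_complexity (module_files : List (String × String)) (out : List (String × Int)) : Prop := out = analyze_module_complexity_alt module_files
instance (module_files : List (String × String)) (out : List (String × Int)) : Decidable (Spec_analyze_module_complexity module_files out) := by unfold Spec_analyze_module_complexity; infer_instance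

-- ===== CLAIM (what is proved, stated in full; the proofs are below) =====
def Claim_equal_analyze_module_complexity : Prop := ∀ (module_files : List (String × String)), Dom_analyze_module_complexity module_files → Spec_analyze_module_complexity module_files (analyze_module_complexity module_files)

-- ===== LEMMAS AND PROOFS =====

-- a nonempty suffix determines the last element
theorem pv_getLast?_of_suffix {α : Type} {p s : List α} (h : p <:+ s) (hp : p ≠ []) :
    s.getLast? = p.getLast? := by
  obtain ⟨t, rfl⟩ := h
  rw [List.getLast?_append]
  cases hpl : p.getLast? with
  | none => exact absurd (List.getLast?_eq_none_iff.mp hpl) hp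
  | some a => rfl

-- the three extensions are mutually exclusive (different last characters)
theorem pv_excl {s : String} {p q : String} (hne : p.toList.getLast? ≠ q.toList.getLast?)
    (hp : p.toList ≠ []) (hq : q.toList ≠ []) (h : PySem.Str.endswith s p = true) :
    PySem.Str.endswith s q = false := by
  by_contra hc
  have hq' : PySem.Str.endswith s q = true := by
    cases h' : PySem.Str.endswith s q with
    | true => rfl
    | false => exact absurd h' hc
  have h1 : p.toList <:+ s.toList := by
    have := (PySem.Chars.endswith_iff (s := s.toList) (p := p.toList)).mp (by simpa using h)
    exact this
  have h2 : q.toList <:+ s.toList := by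
    have := (PySem.Chars.endswith_iff (s := s.toList) (p := q.toList)).mp (by simpa using hq')
    exact this
  have e1 := pv_getLast?_of_suffix h1 hp
  have e2 := pv_getLast?_of_suffix h2 hq
  exact hne (e1 ▸ e2 ▸ rfl)

-- loop invariant: A's fold from any start state adds B's per-field sums
theorem pv_fold (l : List (String × String)) :
    ∀ (a b c d e f : Int),
    l.foldl amcStep (a, b, c, d, e, f) =
      (a + (l.countP (fun pc => PySem.Str.endswith pc.1 ".py") : Int),
       b + (l.countP (fun pc => PySem.Str.endswith pc.1 ".xml") : Int),
       c + (l.countP (fun pc => PySem.Str.endswith pc.1 ".csv") : Int),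
       d + (l.map (fun pc => (PySem.Str.count pc.2 "\n" : Int) + 1)).sum,
       e + ((l.filter (fun pc => PySem.Str.endswith pc.1 ".py")).map
              (fun pc => (PySem.Str.count pc.2 "class " : Int) * (PySem.Str.count pc.2 "models.Model" : Int))).sum,
       f + ((l.filter (fun pc => PySem.Str.endswith pc.1 ".xml")).map
              (fun pc => (PySem.Str.count pc.2 "<record" : Int) * (PySem.Str.count pc.2 "ir.ui.view" : Int))).sum) := by
  induction l with
  | nil => intro a b c d e f; simp
  | cons hd tl ih =>
    intro a b c d e f
    by_cases hpy : PySem.Str.endswith hd.1 ".py" = true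
    · have hx : PySem.Str.endswith hd.1 ".xml" = false := pv_excl (by decide) (by decide) (by decide) hpy
      have hc : PySem.Str.endswith hd.1 ".csv" = false := pv_excl (by decide) (by decide) (by decide) hpy
      simp only [List.foldl_cons, amcStep, hpy, if_true, ih, List.countP_cons, List.map_cons,
        List.sum_cons, List.filter_cons, hx, hc]
      simp
      and_intros <;> first | trivial | ring
    · by_cases hxml : PySem.Str.endswith hd.1 ".xml" = true
      · have hc : PySem.Str.endswith hd.1 ".csv" = false := pv_excl (by decide) (by decide) (by decide) hxml
        simp only [List.foldl_cons, amcStep, hpy, hxml, if_true, if_false, ih, List.countP_cons,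
          List.map_cons, List.sum_cons, List.filter_cons, hc]
        simp [hpy, hxml]
        and_intros <;> first | trivial | ring
      · by_cases hcsv : PySem.Str.endswith hd.1 ".csv" = true
        · simp only [List.foldl_cons, amcStep, hpy, hxml, hcsv, if_true, if_false, ih,
            List.countP_cons, List.map_cons, List.sum_cons, List.filter_cons]
          simp [hpy, hxml, hcsv]
          and_intros <;> first | trivial | ring
        · simp only [List.foldl_cons, amcStep, hpy, hxml, hcsv, if_false, ih,
            List.countP_cons, List.map_cons, List.sum_cons, List.filter_cons]
          simp [hpy, hxml, hcsv]
          and_intros <;> first | trivial | ring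

-- ===== VERDICT (by name: the statement is the Claim_ definition above) =====
theorem analyze_module_complexity_spec : Claim_equal_analyze_module_complexity := by
  intro mf _
  unfold Spec_analyze_module_complexity analyze_module_complexity analyze_module_complexity_alt
  simp only [pv_fold, zero_add]
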